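-- pv_equiv track=rewrite | github.com/chris-free15/advent_2020 | day_5/day_5.py | binary_part_col
-- ===== SOURCE A (Python) =====
-- def binary_part_col(col, index, values):
--     if index == 2:
--         if col[-1] == 'R':
--             return values[1]
--         else:
--             return values[0]
--     else:
--         if col[index] == 'L':
--             last_col = len(values) // 2
--             values = values[0:(last_col)]
--             return binary_part_col(col, index + 1, values)
--         else:
--             last_col = len(values) // 2
--             values = values[last_col:]
--             return binary_part_col(col, index + 1, values)
-- ===== SOURCE B (Python) =====
-- def binary_part_col(col, index, values):
--     for i in range(index, 2):
--         half = len(values) // 2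
--         values = values[:half] if col[i] == 'L' else values[half:]
--     return values[1] if col[-1] == 'R' else values[0]
-- ===== Notes on version B (the rewrite author's own statement) =====
-- stated objective: idiomatic
-- what changed: The tail recursion that threads (index, values) through self-calls is replaced by a plain for-loop over range(index, 2) with conditional-expression slicing and a single terminal return, as an experienced Python developer would write it.
import Mathlib
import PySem

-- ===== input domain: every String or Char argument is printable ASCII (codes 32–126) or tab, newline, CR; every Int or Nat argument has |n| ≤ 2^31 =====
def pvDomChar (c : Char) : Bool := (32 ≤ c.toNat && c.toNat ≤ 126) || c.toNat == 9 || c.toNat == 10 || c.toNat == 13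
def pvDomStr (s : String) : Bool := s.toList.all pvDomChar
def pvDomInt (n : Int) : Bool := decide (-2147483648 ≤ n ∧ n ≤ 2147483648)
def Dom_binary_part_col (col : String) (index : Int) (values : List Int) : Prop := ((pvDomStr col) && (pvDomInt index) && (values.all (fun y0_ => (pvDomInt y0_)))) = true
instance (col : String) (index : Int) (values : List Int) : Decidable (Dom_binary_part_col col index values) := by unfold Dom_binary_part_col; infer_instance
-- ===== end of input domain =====

-- B rewrites A's tail recursion as an idiomatic for-loop over range(index, 2); same cost, plainer code.

-- ===== PORT A =====
-- A's self-recursion ascends index towards 2; ported with fuel (2 - index).toNat, which runs out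
-- exactly when the Python recursion terminates (inputs where Python diverges/raises are outside Pre_;
-- there, out-of-range accesses fall back to 0 via .getD).
def binary_part_col_go (col : String) : Nat → Int → List Int → Int
  | 0, _, values =>
      if PySem.Str.pyGet? col (-1) = some 'R' then (PySem.List.pyGet? values 1).getD 0
      else (PySem.List.pyGet? values 0).getD 0
  | fuel+1, index, values =>
      if index = 2 then
        (if PySem.Str.pyGet? col (-1) = some 'R' then (PySem.List.pyGet? values 1).getD 0
         else (PySem.List.pyGet? values 0).getD 0)
      else if PySem.Str.pyGet? col index = some 'L' then
        let last_col := PySem.Int.floordiv (values.length : Int) 2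
        binary_part_col_go col fuel (index + 1) (PySem.List.slice values (some 0) (some last_col))
      else
        let last_col := PySem.Int.floordiv (values.length : Int) 2
        binary_part_col_go col fuel (index + 1) (PySem.List.slice values (some last_col) none)

def binary_part_col (col : String) (index : Int) (values : List Int) : Int :=
  binary_part_col_go col (2 - index).toNat index values

-- ===== PORT B =====
-- one loop step: values = values[:half] if col[i] == 'L' else values[half:]
def pvStep (col : String) (vs : List Int) (i : Int) : List Int :=
  let half := PySem.Int.floordiv (vs.length : Int) 2
  if PySem.Str.pyGet? col i = some 'L' then PySem.List.slice vs none (some half)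
  else PySem.List.slice vs (some half) none

-- terminal: values[1] if col[-1] == 'R' else values[0]
def pvTerm (col : String) (vs : List Int) : Int :=
  if PySem.Str.pyGet? col (-1) = some 'R' then (PySem.List.pyGet? vs 1).getD 0
  else (PySem.List.pyGet? vs 0).getD 0

def binary_part_col_alt (col : String) (index : Int) (values : List Int) : Int :=
  pvTerm col ((PySem.List.pyRange index 2 1).foldl (pvStep col) values)

-- ===== PRECONDITION & SPEC =====
-- length of values after the remaining halving steps, reading col[i], col[i+1], ... (Python indexing,
-- negative i wraps); none = some col access out of range (Python A raises IndexError there)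
def pvLens? (col : String) : Nat → Int → Nat → Option Nat
  | 0, _, n => some n
  | k+1, i, n =>
    match PySem.Str.pyGet? col i with
    | none => none
    | some c => pvLens? col k (i + 1) (if c = 'L' then n / 2 else n - n / 2)

-- Pre_ = the inputs on which Python A returns: index ≤ 2 with every accessed col position in range and
-- the values list, after the halving steps, long enough for the final values[1]/values[0] read.
-- index < -900 is excluded because there Python A's recursion (depth 3 - index) exceeds CPython's
-- recursion limit and raises RecursionError before it can return.
def Pre_binary_part_col (col : String) (index : Int) (values : List Int) : Prop :=
  -900 ≤ index ∧ index ≤ 2 ∧ col.toList ≠ [] ∧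
  (if col.toList.getLast? = some 'R' then 2 else 1) ≤
    (pvLens? col (2 - index).toNat index values.length).getD 0
instance (col : String) (index : Int) (values : List Int) : Decidable (Pre_binary_part_col col index values) := by
  unfold Pre_binary_part_col; infer_instance

def pvWitness_binary_part_col : String × Int × List Int := ("LRL", 0, [0, 1, 2, 3, 4, 5, 6, 7])

def Spec_binary_part_col (col : String) (index : Int) (values : List Int) (out : Int) : Prop := out = binary_part_col_alt col index values
instance (col : String) (index : Int) (values : List Int) (out : Int) : Decidable (Spec_binary_part_col col index values out) := by unfold Spec_binary_part_col; infer_instance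

-- ===== CLAIM (what is proved, stated in full; the proofs are below) =====
def Claim_equal_binary_part_col : Prop := ∀ (col : String) (index : Int) (values : List Int), Dom_binary_part_col col index values → Pre_binary_part_col col index values → Spec_binary_part_col col index values (binary_part_col col index values)

-- ===== LEMMAS AND PROOFS =====
lemma go_eq_foldl (col : String) :
    ∀ (k : Nat) (index : Int) (values : List Int), (2 - index).toNat = k →
      binary_part_col_go col k index values =
        pvTerm col ((PySem.List.pyRange index 2 1).foldl (pvStep col) values) := by
  intro k
  induction k with
  | zero =>
    intro index values h
    have h2 : (2 : Int) ≤ index := by omega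
    rw [PySem.List.pyRange_one_eq_nil h2]
    simp [binary_part_col_go, pvTerm]
  | succ k ih =>
    intro index values h
    have hlt : index < 2 := by omega
    have hne : index ≠ 2 := by omega
    rw [PySem.List.pyRange_one_cons hlt, List.foldl_cons]
    simp only [binary_part_col_go, if_neg hne, pvStep]
    by_cases hc : PySem.Str.pyGet? col index = some 'L'
    · simp only [if_pos hc, PySem.List.slice_zero_start]
      exact ih (index + 1) _ (by omega)
    · simp only [if_neg hc]
      exact ih (index + 1) _ (by omega)

-- ===== VERDICT (by name: the statement is the Claim_ definition above) =====
theorem binary_part_col_spec : Claim_equal_binary_part_col := by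
  intro col index values _ _
  unfold Spec_binary_part_col binary_part_col binary_part_col_alt
  exact go_eq_foldl col _ index values rfl
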